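-- pv_equiv track=rewrite | github.com/dwaybright/g729a_python | src/basic_op.py | norm_l
-- ===== SOURCE A (Python) =====
-- def norm_l(L_var1: int) -> int:
--     if L_var1 == 0:
--         return 0
--     elif L_var1 == -1:
--         return 31
--
--     result = 0
--     test = L_var1
--     if test < 0:
--         test = ~test
--
--     while test < 1073741824:
--         test = test << 1
--         result = result + 1
--
--     return result
-- ===== SOURCE B (Python) =====
-- def norm_l(L_var1: int) -> int:
--     if L_var1 == 0:
--         return 0
--     test = L_var1 if L_var1 >= 0 else ~L_var1
--     return max(0, 31 - test.bit_length())
-- ===== Notes on version B (the rewrite author's own statement) =====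
-- stated objective: simpler
-- what changed: Replaces the shift-counting while loop with a closed form: clamp-at-zero of 31 minus the bit length of the (complemented when negative) input, with no loop and no special branch for the all-ones negative input.
import Mathlib
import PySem

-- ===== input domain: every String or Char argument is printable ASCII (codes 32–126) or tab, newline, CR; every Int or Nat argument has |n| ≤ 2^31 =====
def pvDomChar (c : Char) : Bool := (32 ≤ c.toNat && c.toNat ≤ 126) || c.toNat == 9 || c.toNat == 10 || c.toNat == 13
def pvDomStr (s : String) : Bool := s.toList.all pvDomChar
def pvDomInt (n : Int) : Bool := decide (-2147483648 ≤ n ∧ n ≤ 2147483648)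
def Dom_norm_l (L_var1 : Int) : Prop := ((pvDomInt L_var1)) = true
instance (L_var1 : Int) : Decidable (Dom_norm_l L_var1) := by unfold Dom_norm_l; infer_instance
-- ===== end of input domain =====

-- B replaces A's shift-counting loop by the closed form max 0 (31 - bit_length test): simpler, no loop.

-- ===== PORT A =====
-- the while loop: `while test < 1073741824: test <<= 1; result += 1`.
-- Fuel only makes the recursion total; with test ≥ 1 (always the case) at most 30
-- iterations run, so fuel 40 never cuts the computation short.  `test << 1` = `test * 2`.
def normLoopA : Nat → Int → Int → Int
  | 0, _, result => result
  | fuel + 1, test, result =>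
      if test < 1073741824 then normLoopA fuel (test * 2) (result + 1) else result

def norm_l (L_var1 : Int) : Int :=
  if L_var1 = 0 then 0
  else if L_var1 = -1 then 31
  else
    -- result = 0; test = L_var1; if test < 0: test = ~test  (Python ~x = -x-1)
    normLoopA 40 (if L_var1 < 0 then -L_var1 - 1 else L_var1) 0

-- ===== PORT B =====
-- Python int.bit_length() for n ≥ 0 (B only applies it to nonnegative test)
def pvBitLength (n : Int) : Int := if n ≤ 0 then 0 else ((Int.toNat n).log2 : Int) + 1

def norm_l_alt (L_var1 : Int) : Int :=
  if L_var1 = 0 then 0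
  else
    let test := if L_var1 ≥ 0 then L_var1 else -L_var1 - 1  -- ~L_var1
    max 0 (31 - pvBitLength test)

-- ===== PRECONDITION & SPEC =====
def Spec_norm_l (L_var1 : Int) (out : Int) : Prop := out = norm_l_alt L_var1
instance (L_var1 : Int) (out : Int) : Decidable (Spec_norm_l L_var1 out) := by unfold Spec_norm_l; infer_instance

-- ===== CLAIM (what is proved, stated in full; the proofs are below) =====
def Claim_equal_norm_l : Prop := ∀ (L_var1 : Int), Dom_norm_l L_var1 → Spec_norm_l L_var1 (norm_l L_var1)

-- ===== LEMMAS AND PROOFS =====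

lemma log2_two_mul (n : Nat) (h : 1 ≤ n) : Nat.log2 (2 * n) = Nat.log2 n + 1 := by
  rw [Nat.log2_eq_log_two, Nat.log2_eq_log_two, mul_comm,
    Nat.log_mul_base (by norm_num) (by omega)]

lemma bitLength_two_mul (t : Int) (h : 1 ≤ t) :
    pvBitLength (t * 2) = pvBitLength t + 1 := by
  unfold pvBitLength
  have h1 : ¬ t ≤ 0 := by omega
  have h2 : ¬ t * 2 ≤ 0 := by nlinarith
  have ht : (t * 2).toNat = 2 * t.toNat := by omega
  simp [h1, h2, ht, log2_two_mul t.toNat (by omega)]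

lemma bitLength_ge_iff (t : Int) (h : 1 ≤ t) :
    (31 ≤ pvBitLength t ↔ 1073741824 ≤ t) := by
  unfold pvBitLength
  have h1 : ¬ t ≤ 0 := by omega
  simp only [h1, if_false]
  have hne : t.toNat ≠ 0 := by omega
  have := Nat.log2_lt hne (k := 30)
  constructor
  · intro hge
    have : ¬ t.toNat < 2 ^ 30 := by
      intro hlt
      have := this.mpr hlt
      omega
    have : (1073741824 : Nat) ≤ t.toNat := by norm_num at this ⊢; omega
    omega
  · intro hge
    have : ¬ t.toNat.log2 < 30 := by
      intro hlt
      have := this.mp hlt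
      norm_num at this
      omega
    omega

lemma normLoopA_eq (fuel : Nat) :
    ∀ (test r : Int), 1 ≤ test → 31 - pvBitLength test ≤ (fuel : Int) →
      normLoopA fuel test r = r + max 0 (31 - pvBitLength test) := by
  induction fuel with
  | zero =>
    intro test r ht hf
    simp only [normLoopA]
    have : max 0 (31 - pvBitLength test) = 0 := by
      simp at hf ⊢; omega
    omega
  | succ f ih =>
    intro test r ht hf
    simp only [normLoopA]
    by_cases hc : test < 1073741824
    · have hbl : pvBitLength test ≤ 30 := by
        have := (bitLength_ge_iff test ht).mpr
        by_contra hx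
        have : 1073741824 ≤ test := (bitLength_ge_iff test ht).mp (by omega)
        omega
      have hbl2 := bitLength_two_mul test ht
      rw [if_pos hc, ih (test * 2) (r + 1) (by nlinarith) (by omega), hbl2]
      omega
    · have : 31 ≤ pvBitLength test := (bitLength_ge_iff test ht).mpr (by omega)
      rw [if_neg hc]
      omega

lemma bitLength_ge_one (t : Int) (h : 1 ≤ t) : 1 ≤ pvBitLength t := by
  unfold pvBitLength
  have h1 : ¬ t ≤ 0 := by omega
  simp only [h1, if_false]
  omega

-- ===== VERDICT (by name: the statement is the Claim_ definition above) =====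
theorem norm_l_spec : Claim_equal_norm_l := by
  intro L _
  unfold Spec_norm_l norm_l norm_l_alt
  by_cases h0 : L = 0
  · simp [h0]
  · by_cases h1 : L = -1
    · norm_num [h0, h1, pvBitLength]
    · -- the test value is the same expression in both ports
      have hsame : (if L < 0 then -L - 1 else L) = (if L ≥ 0 then L else -L - 1) := by
        split_ifs <;> omega
      set t : Int := if L < 0 then -L - 1 else L with hT
      have ht : 1 ≤ t := by
        rw [hT]; split_ifs <;> omega
      have hfuel : 31 - pvBitLength t ≤ (40 : Int) := by
        have := bitLength_ge_one t ht
        omega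
      simp only [h0, h1, if_false, ← hsame]
      rw [normLoopA_eq 40 t 0 ht hfuel]
      omega
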